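-- pv_equiv track=rewrite | github.com/mpatchesny/projekt_biznes_elektroniczny | scripts/product_import/generate_insert_product_query.py | generateQueryForProductAttributes
-- ===== SOURCE A (Python) =====
-- def generateQueryForProductAttributes(product) -> str:
--     """ Generuje zapytanie dla tabel dotyczących atrybutów produktów """
--     li = []
--     if not product.get("attributes"):
--         return
--
--     is_default = "1"
--     for x in product["attributes"]:
--         for key in x.keys():
--             if not key in ["Liczba sztuk:", "Opór:"]:
--                 attribute_name = key[:-1]
--                 attribute_name = attribute_name.replace("'", "''")
--                 attribute_value = x[key]
--                 attribute_value = attribute_value.replace("'", "''")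
--
--                 prodAttributeLookup = f"""INSERT INTO prestashop.ps_attribute_lang SELECT (SELECT COALESCE(MAX(id_attribute)+1, 1) FROM prestashop.ps_attribute_lang), 1, '{attribute_value}' FROM DUAL WHERE NOT EXISTS (SELECT * FROM prestashop.ps_attribute_lang WHERE name='{attribute_value}' LIMIT 1);\nINSERT INTO prestashop.ps_attribute SELECT (SELECT id_attribute FROM prestashop.ps_attribute_lang WHERE name='{attribute_value}' LIMIT 1), (SELECT id_attribute_group FROM prestashop.ps_attribute_group_lang WHERE name='{attribute_name}' LIMIT 1), 'color', 0 FROM DUAL WHERE NOT EXISTS (SELECT * FROM prestashop.ps_attribute WHERE id_attribute = (SELECT id_attribute FROM prestashop.ps_attribute_lang WHERE name='{attribute_value}' LIMIT 1) LIMIT 1);"""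
--
--                 prodAttribute = f"""SET @newProdAttrtibId := (SELECT COALESCE(MAX(id_product_attribute)+1, 1) FROM prestashop.ps_product_attribute);\nINSERT INTO prestashop.ps_product_attribute VALUES (@newProdAttrtibId, (SELECT MAX(id_product) FROM prestashop.ps_product), NULL, NULL, 'Magazyn', NULL, NULL, NULL, NULL, 0.0, 0.0, 0.0, 300, 0.0, 0.0, {is_default}, 1, NULL, false, NULL);"""
--
--                 prodAttribCombination = f"""INSERT INTO prestashop.ps_product_attribute_combination(id_attribute, id_product_attribute) VALUES ((SELECT id_attribute FROM prestashop.ps_attribute_lang WHERE name = '{attribute_value}' LIMIT 1), (SELECT MAX(id_product_attribute) FROM prestashop.ps_product_attribute));"""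
--
--                 prodAttributeShop = f"""INSERT INTO prestashop.ps_product_attribute_shop VALUES ((SELECT MAX(id_product) FROM prestashop.ps_product), (SELECT MAX(id_product_attribute) FROM prestashop.ps_product_attribute), 1, 0.0, 0.0, 0.0, 0.0, 0.0, {is_default}, 1, NULL, false, NULL);"""
--
--                 stockAvailable = f"""SET @newStockAId := (SELECT COALESCE(MAX(id_stock_available)+1, 1) FROM prestashop.ps_stock_available);\nINSERT INTO prestashop.ps_stock_available VALUES (@newStockAId, (SELECT MAX(id_product) FROM prestashop.ps_product), (SELECT MAX(id_product_attribute) FROM prestashop.ps_product_attribute), 1, 0, 300, 300, 0, 0, 0, 'Magazyn');"""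
--
--                 li.append(prodAttributeLookup)
--                 li.append(prodAttribute)
--                 li.append(prodAttribCombination)
--                 li.append(prodAttributeShop)
--                 li.append(stockAvailable)
--                 li.append("\n")
--
--                 if (is_default == "1"): is_default = "NULL"
--
--     return "\n".join(li)
-- ===== SOURCE B (Python) =====
-- # B: per-attribute single block strings assembled with "\n\n\n" separators + trailing "\n\n",
-- # is_default decided by head/tail split of the filtered pair list (no mutable flag, no flat list of six strings).
-- EXCLUDED = ("Liczba sztuk:", "Opór:")
--
--
-- def _esc(s):
--     return s.replace("'", "''")
--
--
-- def _block(name, value, is_default):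
--     """The five SQL statements for one attribute, pre-joined into one block string."""
--     return "\n".join([
--         f"INSERT INTO prestashop.ps_attribute_lang SELECT (SELECT COALESCE(MAX(id_attribute)+1, 1) FROM prestashop.ps_attribute_lang), 1, '{value}' FROM DUAL WHERE NOT EXISTS (SELECT * FROM prestashop.ps_attribute_lang WHERE name='{value}' LIMIT 1);\nINSERT INTO prestashop.ps_attribute SELECT (SELECT id_attribute FROM prestashop.ps_attribute_lang WHERE name='{value}' LIMIT 1), (SELECT id_attribute_group FROM prestashop.ps_attribute_group_lang WHERE name='{name}' LIMIT 1), 'color', 0 FROM DUAL WHERE NOT EXISTS (SELECT * FROM prestashop.ps_attribute WHERE id_attribute = (SELECT id_attribute FROM prestashop.ps_attribute_lang WHERE name='{value}' LIMIT 1) LIMIT 1);",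
--         f"SET @newProdAttrtibId := (SELECT COALESCE(MAX(id_product_attribute)+1, 1) FROM prestashop.ps_product_attribute);\nINSERT INTO prestashop.ps_product_attribute VALUES (@newProdAttrtibId, (SELECT MAX(id_product) FROM prestashop.ps_product), NULL, NULL, 'Magazyn', NULL, NULL, NULL, NULL, 0.0, 0.0, 0.0, 300, 0.0, 0.0, {is_default}, 1, NULL, false, NULL);",
--         f"INSERT INTO prestashop.ps_product_attribute_combination(id_attribute, id_product_attribute) VALUES ((SELECT id_attribute FROM prestashop.ps_attribute_lang WHERE name = '{value}' LIMIT 1), (SELECT MAX(id_product_attribute) FROM prestashop.ps_product_attribute));",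
--         f"INSERT INTO prestashop.ps_product_attribute_shop VALUES ((SELECT MAX(id_product) FROM prestashop.ps_product), (SELECT MAX(id_product_attribute) FROM prestashop.ps_product_attribute), 1, 0.0, 0.0, 0.0, 0.0, 0.0, {is_default}, 1, NULL, false, NULL);",
--         f"SET @newStockAId := (SELECT COALESCE(MAX(id_stock_available)+1, 1) FROM prestashop.ps_stock_available);\nINSERT INTO prestashop.ps_stock_available VALUES (@newStockAId, (SELECT MAX(id_product) FROM prestashop.ps_product), (SELECT MAX(id_product_attribute) FROM prestashop.ps_product_attribute), 1, 0, 300, 300, 0, 0, 0, 'Magazyn');",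
--     ])
--
--
-- def generateQueryForProductAttributes(product) -> str:
--     """ Generuje zapytanie dla tabel dotyczących atrybutów produktów """
--     if not product.get("attributes"):
--         return
--     pairs = [(_esc(k[:-1]), _esc(x[k]))
--              for x in product["attributes"] for k in x if k not in EXCLUDED]
--     if not pairs:
--         return ""
--     first, rest = pairs[0], pairs[1:]
--     blocks = [_block(first[0], first[1], "1")] + [_block(n, v, "NULL") for n, v in rest]
--     return "\n\n\n".join(blocks) + "\n\n"
-- ===== Notes on version B (the rewrite author's own statement) =====
-- stated objective: alternative
-- what changed: A accumulates a flat list of six strings per kept attribute (five statements plus a lone newline sentinel) under a mutable is_default flag and joins it with '\n'; B never builds that flat list: it pre-joins each attribute's five statements into one block string, decides is_default by a head/tail split of the filtered pair list, and assembles the result as '\n\n\n'.join(blocks) + '\n\n' (returning '' when no pair survives the filter).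
import Mathlib
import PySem

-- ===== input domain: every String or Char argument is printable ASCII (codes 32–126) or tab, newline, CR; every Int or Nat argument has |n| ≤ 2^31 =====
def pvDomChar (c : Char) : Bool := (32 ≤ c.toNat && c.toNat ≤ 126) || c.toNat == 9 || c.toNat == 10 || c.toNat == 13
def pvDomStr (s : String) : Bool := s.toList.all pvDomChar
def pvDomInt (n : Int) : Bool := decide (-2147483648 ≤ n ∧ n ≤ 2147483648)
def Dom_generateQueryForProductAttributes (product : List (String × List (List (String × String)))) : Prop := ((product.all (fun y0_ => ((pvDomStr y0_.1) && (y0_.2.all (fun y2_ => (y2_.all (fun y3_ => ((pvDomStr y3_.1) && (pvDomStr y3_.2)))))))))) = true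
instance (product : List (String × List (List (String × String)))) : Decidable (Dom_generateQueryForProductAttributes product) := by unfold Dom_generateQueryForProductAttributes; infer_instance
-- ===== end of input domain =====

-- B assembles the output as one pre-joined block string per attribute, glued with "\n\n\n" and a
-- trailing "\n\n", with is_default decided by a head/tail split of the filtered pair list
-- (A instead accumulates a flat list of six strings per attribute with a mutable flag and joins
-- it by "\n"); objective: alternative assembly, same cost.

-- ===== PORT A =====
-- the five SQL statement strings A appends per kept key
def pvSqlLines (attribute_name attribute_value is_default : String) : List String :=
  [ "INSERT INTO prestashop.ps_attribute_lang SELECT (SELECT COALESCE(MAX(id_attribute)+1, 1) FROM prestashop.ps_attribute_lang), 1, '" ++ attribute_value ++ "' FROM DUAL WHERE NOT EXISTS (SELECT * FROM prestashop.ps_attribute_lang WHERE name='" ++ attribute_value ++ "' LIMIT 1);\nINSERT INTO prestashop.ps_attribute SELECT (SELECT id_attribute FROM prestashop.ps_attribute_lang WHERE name='" ++ attribute_value ++ "' LIMIT 1), (SELECT id_attribute_group FROM prestashop.ps_attribute_group_lang WHERE name='" ++ attribute_name ++ "' LIMIT 1), 'color', 0 FROM DUAL WHERE NOT EXISTS (SELECT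 * FROM prestashop.ps_attribute WHERE id_attribute = (SELECT id_attribute FROM prestashop.ps_attribute_lang WHERE name='" ++ attribute_value ++ "' LIMIT 1) LIMIT 1);"
  , "SET @newProdAttrtibId := (SELECT COALESCE(MAX(id_product_attribute)+1, 1) FROM prestashop.ps_product_attribute);\nINSERT INTO prestashop.ps_product_attribute VALUES (@newProdAttrtibId, (SELECT MAX(id_product) FROM prestashop.ps_product), NULL, NULL, 'Magazyn', NULL, NULL, NULL, NULL, 0.0, 0.0, 0.0, 300, 0.0, 0.0, " ++ is_default ++ ", 1, NULL, false, NULL);"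
  , "INSERT INTO prestashop.ps_product_attribute_combination(id_attribute, id_product_attribute) VALUES ((SELECT id_attribute FROM prestashop.ps_attribute_lang WHERE name = '" ++ attribute_value ++ "' LIMIT 1), (SELECT MAX(id_product_attribute) FROM prestashop.ps_product_attribute));"
  , "INSERT INTO prestashop.ps_product_attribute_shop VALUES ((SELECT MAX(id_product) FROM prestashop.ps_product), (SELECT MAX(id_product_attribute) FROM prestashop.ps_product_attribute), 1, 0.0, 0.0, 0.0, 0.0, 0.0, " ++ is_default ++ ", 1, NULL, false, NULL);"
  , "SET @newStockAId := (SELECT COALESCE(MAX(id_stock_available)+1, 1) FROM prestashop.ps_stock_available);\nINSERT INTO prestashop.ps_stock_available VALUES (@newStockAId, (SELECT MAX(id_product) FROM prestashop.ps_product), (SELECT MAX(id_product_attribute) FROM prestashop.ps_product_attribute), 1, 0, 300, 300, 0, 0, 0, 'Magazyn');" ]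

-- one iteration of A's inner `for key in x.keys()` loop; state = (li, is_default)
def pvA_keyStep (x : PySem.Dict String String) (st : List String × String) (key : String) : List String × String :=
  if key ∈ (["Liczba sztuk:", "Opór:"] : List String) then st
  else
    let attribute_name := PySem.Str.slice key none (some (-1))
    let attribute_name := PySem.Str.replace attribute_name "'" "''"
    let attribute_value := x.getD key ""
    let attribute_value := PySem.Str.replace attribute_value "'" "''"
    ( st.1 ++ pvSqlLines attribute_name attribute_value st.2 ++ ["\n"]
    , if st.2 = "1" then "NULL" else st.2 )

def generateQueryForProductAttributes (product : List (String × List (List (String × String)))) : Option String :=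
  match (PySem.Dict.ofList product).get? "attributes" with
  | none => none
  | some attrs =>
    if attrs.isEmpty then none
    else
      let st := attrs.foldl
        (fun st x =>
          let d := PySem.Dict.ofList x
          d.keys.foldl (pvA_keyStep d) st)
        (([] : List String), "1")
      some (PySem.Str.join "\n" st.1)

-- ===== PORT B =====
def pvEXCLUDED : List String := ["Liczba sztuk:", "Opór:"]

def pvEsc (s : String) : String := PySem.Str.replace s "'" "''"

-- Source B's _block: the five statements for one attribute, pre-joined into one block string
def pvBlock (name value is_default : String) : String :=
  PySem.Str.join "\n"
  [ "INSERT INTO prestashop.ps_attribute_lang SELECT (SELECT COALESCE(MAX(id_attribute)+1, 1) FROM prestashop.ps_attribute_lang), 1, '" ++ value ++ "' FROM DUAL WHERE NOT EXISTS (SELECT * FROM prestashop.ps_attribute_lang WHERE name='" ++ value ++ "' LIMIT 1);\nINSERT INTO prestashop.ps_attribute SELECT (SELECT id_attribute FROM prestashop.ps_attribute_lang WHERE name='" ++ value ++ "' LIMIT 1), (SELECT id_attribute_group FROM prestashop.ps_attribute_group_lang WHERE name='" ++ name ++ "' LIMIT 1), 'color', 0 FROM DUAL WHERE NOT EXISTS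 (SELECT * FROM prestashop.ps_attribute WHERE id_attribute = (SELECT id_attribute FROM prestashop.ps_attribute_lang WHERE name='" ++ value ++ "' LIMIT 1) LIMIT 1);"
  , "SET @newProdAttrtibId := (SELECT COALESCE(MAX(id_product_attribute)+1, 1) FROM prestashop.ps_product_attribute);\nINSERT INTO prestashop.ps_product_attribute VALUES (@newProdAttrtibId, (SELECT MAX(id_product) FROM prestashop.ps_product), NULL, NULL, 'Magazyn', NULL, NULL, NULL, NULL, 0.0, 0.0, 0.0, 300, 0.0, 0.0, " ++ is_default ++ ", 1, NULL, false, NULL);"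
  , "INSERT INTO prestashop.ps_product_attribute_combination(id_attribute, id_product_attribute) VALUES ((SELECT id_attribute FROM prestashop.ps_attribute_lang WHERE name = '" ++ value ++ "' LIMIT 1), (SELECT MAX(id_product_attribute) FROM prestashop.ps_product_attribute));"
  , "INSERT INTO prestashop.ps_product_attribute_shop VALUES ((SELECT MAX(id_product) FROM prestashop.ps_product), (SELECT MAX(id_product_attribute) FROM prestashop.ps_product_attribute), 1, 0.0, 0.0, 0.0, 0.0, 0.0, " ++ is_default ++ ", 1, NULL, false, NULL);"
  , "SET @newStockAId := (SELECT COALESCE(MAX(id_stock_available)+1, 1) FROM prestashop.ps_stock_available);\nINSERT INTO prestashop.ps_stock_available VALUES (@newStockAId, (SELECT MAX(id_product) FROM prestashop.ps_product), (SELECT MAX(id_product_attribute) FROM prestashop.ps_product_attribute), 1, 0, 300, 300, 0, 0, 0, 'Magazyn');" ]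

-- the filtered (escaped name, escaped value) pairs one inner dict contributes
def pvPairsOf (x : List (String × String)) : List (String × String) :=
  let d := PySem.Dict.ofList x
  (d.keys.filter (fun k => decide (k ∉ pvEXCLUDED))).map
    (fun k => (pvEsc (PySem.Str.slice k none (some (-1))), pvEsc (d.getD k "")))

def generateQueryForProductAttributes_alt (product : List (String × List (List (String × String)))) : Option String :=
  match (PySem.Dict.ofList product).get? "attributes" with
  | none => none
  | some attrs =>
    if attrs.isEmpty then none
    else
      let pairs := attrs.flatMap pvPairsOf
      match pairs with
      | [] => some ""
      | first :: rest =>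
        some (PySem.Str.join "\n\n\n"
                (pvBlock first.1 first.2 "1" :: rest.map (fun p => pvBlock p.1 p.2 "NULL"))
              ++ "\n\n")

-- ===== PRECONDITION & SPEC =====
def Spec_generateQueryForProductAttributes (product : List (String × List (List (String × String)))) (out : Option String) : Prop := out = generateQueryForProductAttributes_alt product
instance (product : List (String × List (List (String × String)))) (out : Option String) : Decidable (Spec_generateQueryForProductAttributes product out) := by unfold Spec_generateQueryForProductAttributes; infer_instance

-- ===== CLAIM (what is proved, stated in full; the proofs are below) =====
def Claim_equal_generateQueryForProductAttributes : Prop := ∀ (product : List (String × List (List (String × String)))), Dom_generateQueryForProductAttributes product → Spec_generateQueryForProductAttributes product (generateQueryForProductAttributes product)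

-- ===== LEMMAS AND PROOFS =====

-- the step A's loop performs on one kept pair, phrased on the precomputed pair
def pvPairStep (st : List String × String) (p : String × String) : List String × String :=
  ( st.1 ++ pvSqlLines p.1 p.2 st.2 ++ ["\n"]
  , if st.2 = "1" then "NULL" else st.2 )

-- A's inner key loop = a fold of pvPairStep over that dict's filtered pairs
theorem pvL1 (d : PySem.Dict String String) (ks : List String) (st : List String × String) :
    ks.foldl (pvA_keyStep d) st
      = ((ks.filter (fun k => decide (k ∉ pvEXCLUDED))).map
          (fun k => (pvEsc (PySem.Str.slice k none (some (-1))), pvEsc (d.getD k "")))).foldl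
          pvPairStep st := by
  induction ks generalizing st with
  | nil => rfl
  | cons k ks ih =>
    by_cases hk : k ∈ pvEXCLUDED
    · simp [List.foldl, pvA_keyStep, pvEXCLUDED] at *
      rcases hk with h | h <;> simp [h, ih]
    · simp [List.foldl, pvA_keyStep, pvEXCLUDED] at *
      simp [hk.1, hk.2, ih, pvPairStep, pvEsc]

-- A's whole nested loop = a fold of pvPairStep over the flattened pair list
theorem pvL2 (attrs : List (List (String × String))) (st : List String × String) :
    attrs.foldl
        (fun st x =>
          let d := PySem.Dict.ofList x
          d.keys.foldl (pvA_keyStep d) st) st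
      = (attrs.flatMap pvPairsOf).foldl pvPairStep st := by
  induction attrs generalizing st with
  | nil => rfl
  | cons x attrs ih =>
    simp only [List.foldl, List.flatMap_cons, List.foldl_append]
    rw [pvL1, ih]; rfl

-- once is_default is "NULL" it stays "NULL", and the fold just appends
theorem pvL3 (pairs : List (String × String)) (li : List String) :
    pairs.foldl pvPairStep (li, "NULL")
      = (li ++ pairs.flatMap (fun p => pvSqlLines p.1 p.2 "NULL" ++ ["\n"]), "NULL") := by
  induction pairs generalizing li with
  | nil => simp
  | cons p pairs ih =>
    simp only [List.foldl, List.flatMap_cons]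
    rw [show pvPairStep (li, "NULL") p
          = (li ++ pvSqlLines p.1 p.2 "NULL" ++ ["\n"], "NULL") from by
        simp [pvPairStep]]
    rw [ih]
    simp

-- A's fold from the initial state ("1"): first pair gets "1", the rest "NULL"
theorem pvL4 (p : String × String) (rest : List (String × String)) :
    ((p :: rest).foldl pvPairStep (([] : List String), "1")).1
      = pvSqlLines p.1 p.2 "1" ++ ["\n"]
        ++ rest.flatMap (fun q => pvSqlLines q.1 q.2 "NULL" ++ ["\n"]) := by
  simp only [List.foldl]
  rw [show pvPairStep (([] : List String), "1") p
        = (pvSqlLines p.1 p.2 "1" ++ ["\n"], "NULL") from by simp [pvPairStep]]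
  rw [pvL3]

-- basic facts about Python's str.join
theorem pvJoin_nil (sep : String) : PySem.Str.join sep [] = "" := by
  simp [PySem.Str.join, PySem.Chars.join, List.intercalate]

theorem pvJoin_singleton (sep s : String) : PySem.Str.join sep [s] = s := by
  simp [PySem.Str.join, PySem.Chars.join, List.intercalate]

theorem pvJoin_cons_cons (sep a b : String) (r : List String) :
    PySem.Str.join sep (a :: b :: r) = a ++ sep ++ PySem.Str.join sep (b :: r) := by
  simp [PySem.Str.join, PySem.Chars.join_cons_cons, String.append_assoc]

-- join distributes over an append of two nonempty lists
theorem pvJoin_append (sep : String) (xs ys : List String) (hx : xs ≠ []) (hy : ys ≠ []) :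
    PySem.Str.join sep (xs ++ ys)
      = PySem.Str.join sep xs ++ sep ++ PySem.Str.join sep ys := by
  induction xs with
  | nil => exact absurd rfl hx
  | cons a xs ih =>
    cases xs with
    | nil =>
      cases ys with
      | nil => exact absurd rfl hy
      | cons b r => simp [pvJoin_cons_cons, pvJoin_singleton]
    | cons b t =>
      have h := ih (by simp)
      simp only [List.cons_append] at *
      rw [pvJoin_cons_cons, pvJoin_cons_cons sep a b t, h]
      simp [String.append_assoc]

-- the block string is the "\n"-join of A's five statements (same literals)
theorem pvBlock_eq_join (n v d : String) :
    PySem.Str.join "\n" (pvSqlLines n v d) = pvBlock n v d := rfl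

theorem pvSqlLines_ne_nil (n v d : String) : pvSqlLines n v d ≠ [] := by
  simp [pvSqlLines]

-- three "\n" separators in a row collapse to the literal "\n\n\n"
theorem pvNl3 (X : String) :
    ("\n" : String) ++ ("\n" ++ ("\n" ++ X)) = "\n\n\n" ++ X := by
  rw [← String.append_assoc, ← String.append_assoc]
  congr 1

-- the central reshaping: A's "\n"-join over (block ++ ["\n"])-chunks
-- equals B's "\n\n\n"-join of pre-joined blocks plus a trailing "\n\n"
theorem pvJ (bs : List String) (hb : bs ≠ []) (rest : List (String × String)) :
    PySem.Str.join "\n"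
        (bs ++ ["\n"] ++ rest.flatMap (fun q => pvSqlLines q.1 q.2 "NULL" ++ ["\n"]))
      = PySem.Str.join "\n\n\n"
          (PySem.Str.join "\n" bs
            :: rest.map (fun q => PySem.Str.join "\n" (pvSqlLines q.1 q.2 "NULL")))
        ++ "\n\n" := by
  induction rest generalizing bs with
  | nil =>
    rw [List.flatMap_nil, List.append_nil,
        pvJoin_append "\n" bs ["\n"] hb (by simp)]
    rw [List.map_nil, pvJoin_singleton, pvJoin_singleton, String.append_assoc]
    congr 1
  | cons q rest ih =>
    have hX : (pvSqlLines q.1 q.2 "NULL" ++ ["\n"]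
        ++ rest.flatMap (fun r => pvSqlLines r.1 r.2 "NULL" ++ ["\n"])) ≠ [] := by
      simp [pvSqlLines]
    rw [List.flatMap_cons, show bs ++ ["\n"]
          ++ (pvSqlLines q.1 q.2 "NULL" ++ ["\n"]
              ++ rest.flatMap (fun r => pvSqlLines r.1 r.2 "NULL" ++ ["\n"]))
        = (bs ++ ["\n"])
          ++ (pvSqlLines q.1 q.2 "NULL" ++ ["\n"]
              ++ rest.flatMap (fun r => pvSqlLines r.1 r.2 "NULL" ++ ["\n"])) from by
        simp [List.append_assoc]]
    rw [pvJoin_append "\n" (bs ++ ["\n"]) _ (by simp) hX,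
        pvJoin_append "\n" bs ["\n"] hb (by simp), pvJoin_singleton,
        ih (pvSqlLines q.1 q.2 "NULL") (pvSqlLines_ne_nil _ _ _)]
    rw [List.map_cons, pvJoin_cons_cons]
    simp only [String.append_assoc]
    rw [pvNl3]

-- ===== VERDICT (by name: the statement is the Claim_ definition above) =====
theorem generateQueryForProductAttributes_spec : Claim_equal_generateQueryForProductAttributes := by
  intro product _
  unfold Spec_generateQueryForProductAttributes
  unfold generateQueryForProductAttributes generateQueryForProductAttributes_alt
  cases h : (PySem.Dict.ofList product).get? "attributes" with
  | none => rfl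
  | some attrs =>
    by_cases he : attrs.isEmpty
    · simp [he]
    · simp only [he, Bool.false_eq_true, if_false]
      rw [pvL2]
      cases hp : attrs.flatMap pvPairsOf with
      | nil => simp [pvJoin_nil]
      | cons p rest =>
        simp only []
        rw [pvL4, pvJ (pvSqlLines p.1 p.2 "1") (pvSqlLines_ne_nil _ _ _) rest,
            pvBlock_eq_join]
        rfl
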